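-- pv_equiv track=rewrite | github.com/DooDuZ/sparta_python | daily/boj27172.py | solution
-- ===== SOURCE A (Python) =====
-- def solution(params):
--     n, cards = params
--
--     size = max(cards)
--
--     visited = [True for _ in range(size + 1)]
--
--     wins = [0 for _ in range(size + 1)]
--
--     for card in cards:
--         visited[card] = False
--
--     for card in cards:
--         for i in range(card * 2, size + 1, card):
--             if visited[i]:
--                 continue
--             wins[card] += 1
--             wins[i] -= 1
--
--     answer = []
--
--     for card in cards:
--         answer.append(wins[card])
--
--     return answer
-- ===== SOURCE B (Python) =====
-- def solution(params):
--     n, cards = params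
--     count = {}
--     for c in cards:
--         count[c] = count.get(c, 0) + 1
--     wins = {}
--     for v, cv in count.items():
--         s = 0
--         for q, cq in count.items():
--             if q != v:
--                 if q % v == 0:
--                     s += cv
--                 elif v % q == 0:
--                     s -= cq
--         wins[v] = s
--     return [wins[c] for c in cards]
-- ===== Notes on version B (the rewrite author's own statement) =====
-- stated objective: alternative
-- what changed: A sieves multiples over boolean/score arrays of size max(cards), iterating once per card occurrence; B builds a Counter once and computes each distinct value's score by a pairwise divisibility scan over the distinct values (occurrences handled by counts), with no arrays indexed by value.
-- outside the precondition, e.g. on solution((3, [-2, 2, 4])): A returns [0, 1, -1], B returns [2, 2, -2]; on solution((1, [])): A raises ValueError, B returns []; on solution((1, [0])): A raises ValueError, B returns [0]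
import Mathlib
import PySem

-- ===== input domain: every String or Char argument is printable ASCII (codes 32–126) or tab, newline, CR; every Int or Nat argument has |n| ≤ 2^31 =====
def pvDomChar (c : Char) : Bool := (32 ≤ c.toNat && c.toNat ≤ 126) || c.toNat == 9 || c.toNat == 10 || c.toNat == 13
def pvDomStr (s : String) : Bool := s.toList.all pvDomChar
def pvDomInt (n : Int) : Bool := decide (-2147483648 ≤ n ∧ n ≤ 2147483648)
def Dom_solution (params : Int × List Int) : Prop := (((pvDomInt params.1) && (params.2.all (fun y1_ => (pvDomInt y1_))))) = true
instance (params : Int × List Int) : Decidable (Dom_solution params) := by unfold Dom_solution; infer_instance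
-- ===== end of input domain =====

-- B replaces A's sieve over a max-sized boolean/score array by a Counter plus a pairwise
-- divisibility scan over the distinct card values (objective: alternative algorithm; not claimed faster).

-- ===== PORT A =====
-- first loop: visited[card] = False
def pvVisitLoop (cards : List Int) (vis : List Bool) : List Bool :=
  cards.foldl (fun vis card => PySem.List.pySetD vis card false) vis

-- inner loop: for i in range(card*2, size+1, card): …
def pvInner (visited : List Bool) (size card : Int) (w : List Int) : List Int :=
  (PySem.List.pyRange (card * 2) (size + 1) card).foldl (fun w i =>
    if PySem.List.pyGetD visited i true then w
    else
      let w' := PySem.List.pySetD w card (PySem.List.pyGetD w card 0 + 1)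
      PySem.List.pySetD w' i (PySem.List.pyGetD w' i 0 - 1)) w

-- second loop over cards
def pvWinLoop (cards : List Int) (visited : List Bool) (size : Int) (w : List Int) : List Int :=
  cards.foldl (fun w card => pvInner visited size card w) w

def solution (params : Int × List Int) : List Int :=
  let cards := params.2
  match PySem.List.max? cards (fun x => x) with
  | none => []   -- Python: max([]) raises ValueError; excluded by Pre_
  | some size =>
    let visited : List Bool := (PySem.List.pyRange 0 (size + 1) 1).map (fun _ => true)
    let wins0 : List Int := (PySem.List.pyRange 0 (size + 1) 1).map (fun _ => (0 : Int))
    let visited := pvVisitLoop cards visited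
    let wins := pvWinLoop cards visited size wins0
    cards.foldl (fun answer card => answer ++ [PySem.List.pyGetD wins card 0]) []

-- ===== PORT B =====
-- inner loop of Source B: s accumulated over count.items()
def pvInnerB (items : List (Int × Int)) (vc : Int × Int) : Int :=
  items.foldl (fun s qc =>
    if qc.1 ≠ vc.1 then
      if PySem.Int.mod qc.1 vc.1 == 0 then s + vc.2
      else if PySem.Int.mod vc.1 qc.1 == 0 then s - qc.2
      else s
    else s) 0

def solution_alt (params : Int × List Int) : List Int :=
  let cards := params.2
  let count : PySem.Dict Int Int :=
    cards.foldl (fun d c => d.insert c (d.getD c 0 + 1)) PySem.Dict.empty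
  let wins : PySem.Dict Int Int :=
    count.items.foldl (fun w vc => w.insert vc.1 (pvInnerB count.items vc)) PySem.Dict.empty
  cards.map (fun c => wins.getD c 0)

-- ===== PRECONDITION & SPEC =====
-- Pre_ excludes the empty list and lists containing a value ≤ 0: on empty input and on a card 0
-- A raises (max([]) ValueError / range step 0 ValueError), and a negative card hits A's accidental
-- negative-index wraparound on the visited/wins arrays, a quirk of Python list indexing.
def Pre_solution (params : Int × List Int) : Prop :=
  params.2 ≠ [] ∧ ∀ c ∈ params.2, 1 ≤ c
instance (params : Int × List Int) : Decidable (Pre_solution params) := by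
  unfold Pre_solution; infer_instance

def pvWitness_solution : (Int × List Int) := (3, [1, 2, 4])

def Spec_solution (params : Int × List Int) (out : List Int) : Prop := out = solution_alt params
instance (params : Int × List Int) (out : List Int) : Decidable (Spec_solution params out) := by
  unfold Spec_solution; infer_instance

-- ===== CLAIM (what is proved, stated in full; the proofs are below) =====
def Claim_equal_solution : Prop := ∀ (params : Int × List Int), Dom_solution params → Pre_solution params → Spec_solution params (solution params)

-- ===== LEMMAS AND PROOFS =====

-- pyGetD after pySetD, Int indices
theorem pv_getD_setD {α : Type} (w : List α) (n m : Int) (v d : α)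
    (hn0 : 0 ≤ n) (hn : n < (w.length : Int)) (hm0 : 0 ≤ m) :
    PySem.List.pyGetD (PySem.List.pySetD w n v) m d = if m = n then v else PySem.List.pyGetD w m d := by
  conv_lhs => rw [show n = ((n.toNat : Nat) : Int) by omega, show m = ((m.toNat : Nat) : Int) by omega]
  rw [PySem.List.pyGetD_pySetD_natCast w n.toNat m.toNat v d (by omega)]
  by_cases h : m = n
  · rw [if_pos (by omega), if_pos h]
  · rw [if_neg (by omega), if_neg h, show ((m.toNat : Nat) : Int) = m by omega]

theorem pv_visited (l : List Int) (vis : List Bool)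
    (hl : ∀ c ∈ l, 0 ≤ c ∧ c < (vis.length : Int)) (j : Int) (h0 : 0 ≤ j) (hj : j < (vis.length : Int)) :
    PySem.List.pyGetD (pvVisitLoop l vis) j true
      = if j ∈ l then false else PySem.List.pyGetD vis j true := by
  induction l generalizing vis with
  | nil => simp [pvVisitLoop]
  | cons c t ih =>
    obtain ⟨hc0, hclen⟩ := hl c (by simp)
    have hstep : pvVisitLoop (c :: t) vis = pvVisitLoop t (PySem.List.pySetD vis c false) := rfl
    rw [hstep, ih _ (by intro x hx; simpa [PySem.List.length_pySetD] using hl x (by simp [hx]))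
        (by simpa [PySem.List.length_pySetD] using hj),
      pv_getD_setD vis c j false true hc0 hclen h0]
    by_cases hjc : j = c
    · simp [hjc]
    · by_cases hjt : j ∈ t <;> simp [hjt, hjc]

theorem pv_inner_len (visited : List Bool) (size card : Int) (w : List Int) :
    (pvInner visited size card w).length = w.length := by
  unfold pvInner
  generalize PySem.List.pyRange (card * 2) (size + 1) card = l
  induction l generalizing w with
  | nil => rfl
  | cons i t ih =>
    simp only [List.foldl_cons]
    rw [ih]
    split
    · rfl
    · simp [PySem.List.length_pySetD]

-- per-(card,i) contribution
def pvδ (pres : Int → Bool) (j card i : Int) : Int :=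
  if pres i then 0 else ((if j = card then 1 else 0) + (if j = i then -1 else 0))

theorem pv_inner_getD (visited : List Bool) (size card : Int) (w : List Int)
    (hc0 : 0 ≤ card) (hclen : card < (w.length : Int))
    (hR : ∀ i ∈ PySem.List.pyRange (card * 2) (size + 1) card,
        0 ≤ i ∧ i < (w.length : Int) ∧ i ≠ card)
    (j : Int) (hj0 : 0 ≤ j) (hj : j < (w.length : Int)) :
    PySem.List.pyGetD (pvInner visited size card w) j 0
      = PySem.List.pyGetD w j 0 +
        ((PySem.List.pyRange (card * 2) (size + 1) card).map
          (fun i => pvδ (fun i => PySem.List.pyGetD visited i true) j card i)).sum := by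
  unfold pvInner
  generalize hgen : PySem.List.pyRange (card * 2) (size + 1) card = l at hR ⊢
  clear hgen
  induction l generalizing w with
  | nil => simp
  | cons i t ih =>
    obtain ⟨hi0, hilen, hic⟩ := hR i (by simp)
    simp only [List.foldl_cons, List.map_cons, List.sum_cons]
    by_cases hp : PySem.List.pyGetD visited i true
    · rw [if_pos hp, ih w hclen hj (fun x hx => hR x (by simp [hx]))]
      simp [pvδ, hp]
    · rw [if_neg hp]
      have hw2len : (PySem.List.pySetD (PySem.List.pySetD w card (PySem.List.pyGetD w card 0 + 1)) i
          (PySem.List.pyGetD (PySem.List.pySetD w card (PySem.List.pyGetD w card 0 + 1)) i 0 - 1)).length = w.length := by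
        simp [PySem.List.length_pySetD]
      rw [ih _ (by rw [hw2len]; exact hclen) (by rw [hw2len]; exact hj) (fun x hx => by rw [hw2len]; exact hR x (by simp [hx]))]
      have hstep : PySem.List.pyGetD (PySem.List.pySetD (PySem.List.pySetD w card (PySem.List.pyGetD w card 0 + 1)) i
            (PySem.List.pyGetD (PySem.List.pySetD w card (PySem.List.pyGetD w card 0 + 1)) i 0 - 1)) j 0
          = PySem.List.pyGetD w j 0 + pvδ (fun i => PySem.List.pyGetD visited i true) j card i := by
        rw [pv_getD_setD _ i j _ 0 hi0 (by rw [PySem.List.length_pySetD]; exact hilen) hj0,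
            pv_getD_setD w card i _ 0 hc0 hclen hi0,
            pv_getD_setD w card j _ 0 hc0 hclen hj0]
        rw [if_neg hic]
        simp only [pvδ, hp, if_false, Bool.false_eq_true]
        rcases eq_or_ne j i with hji | hji
        · subst hji
          simp [hic]
          try ring
        · rcases eq_or_ne j card with hjc | hjc
          · subst hjc
            simp [hji]
            try ring
          · simp [hji, hjc]
            try ring
      rw [hstep]; ring

theorem pv_outer_getD (cl : List Int) (visited : List Bool) (size : Int) (w : List Int)
    (hc : ∀ card ∈ cl, 1 ≤ card ∧ card ≤ size)
    (hw : (w.length : Int) = size + 1)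
    (j : Int) (hj0 : 0 ≤ j) (hj : j < (w.length : Int)) :
    PySem.List.pyGetD (pvWinLoop cl visited size w) j 0
      = PySem.List.pyGetD w j 0 +
        (cl.map (fun card =>
          ((PySem.List.pyRange (card * 2) (size + 1) card).map
            (fun i => pvδ (fun i => PySem.List.pyGetD visited i true) j card i)).sum)).sum := by
  induction cl generalizing w with
  | nil => simp [pvWinLoop]
  | cons card t ih =>
    obtain ⟨h1, h2⟩ := hc card (by simp)
    have hstep : pvWinLoop (card :: t) visited size w = pvWinLoop t visited size (pvInner visited size card w) := rfl
    have hlen : ((pvInner visited size card w).length : Int) = size + 1 := by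
      rw [pv_inner_len]; exact hw
    have hRprop : ∀ i ∈ PySem.List.pyRange (card * 2) (size + 1) card, 0 ≤ i ∧ i < (w.length : Int) ∧ i ≠ card := by
      intro i hi
      rw [PySem.List.mem_pyRange_iff_of_pos (by omega)] at hi
      refine ⟨by omega, by omega, by omega⟩
    rw [hstep, ih (pvInner visited size card w) (fun x hx => hc x (List.mem_cons_of_mem card hx)) hlen (by rw [pv_inner_len]; exact hj),
        pv_inner_getD visited size card w (by omega) (by omega) hRprop j hj0 hj]
    simp only [List.map_cons, List.sum_cons]
    ring

-- range membership as divisibility (1 ≤ card, 1 ≤ c ≤ size)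
theorem pv_mem_range_iff (size card c : Int) (hcard : 1 ≤ card) (hc1 : 1 ≤ c) (hcs : c ≤ size) :
    c ∈ PySem.List.pyRange (card * 2) (size + 1) card ↔ card ∣ c ∧ card ≠ c := by
  rw [PySem.List.mem_pyRange_iff_of_pos (by omega)]
  constructor
  · rintro ⟨ha, hb, hd⟩
    obtain ⟨m, hm⟩ := hd
    exact ⟨⟨m + 2, by rw [Int.mul_add]; omega⟩, by omega⟩
  · rintro ⟨⟨k, hk⟩, hne⟩
    have hk1 : 1 ≤ k := by nlinarith
    have hk2 : k ≠ 1 := by rintro rfl; omega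
    have hk3 : 2 ≤ k := by omega
    have h2 : card * 2 ≤ c := by nlinarith
    exact ⟨h2, by omega, ⟨k - 2, by rw [hk]; ring⟩⟩

theorem pv_nodup_range (size card : Int) (h : 0 < card) :
    (PySem.List.pyRange (card * 2) (size + 1) card).Nodup := by
  rw [PySem.List.pyRange_of_pos _ _ h]
  exact (List.nodup_range).map (fun a b hab => by
    have h1 : card * (a : Int) = card * b := by omega
    have h2 := mul_left_cancel₀ (by omega : card ≠ 0) h1
    exact_mod_cast h2)

theorem pv_mod_zero (q v : Int) (hv : 0 < v) : (PySem.Int.mod q v == 0) = decide (v ∣ q) := by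
  have hfm : q.fmod v = q % v := by
    rw [Int.fmod_eq_emod]
    simp [Int.le_of_lt hv]
  by_cases hd : v ∣ q
  · simp [PySem.Int.mod, hfm, hd, Int.emod_eq_zero_of_dvd hd]
  · have hne : q % v ≠ 0 := fun h => hd (Int.dvd_of_emod_eq_zero h)
    simp [PySem.Int.mod, hfm, hd, hne]

-- sum lemmas
theorem pv_sum_ite_count (l : List Int) (c : Int) (f : Int → Int) :
    (l.map (fun x => if c = x then f x else 0)).sum = (l.count c : Int) * f c := by
  induction l with
  | nil => simp
  | cons x t ih =>
    rcases eq_or_ne c x with h | h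
    · subst h
      simp only [List.map_cons, List.sum_cons, ih, List.count_cons_self]
      push_cast; ring
    · simp only [List.map_cons, List.sum_cons, if_neg h, ih]
      simp [List.count_cons]
      exact Or.inl (fun hh => h hh.symm)

theorem pv_sum_ite_mem (l : List Int) (hnd : l.Nodup) (c : Int) (f : Int → Int) :
    (l.map (fun i => if c = i then f i else 0)).sum = if c ∈ l then f c else 0 := by
  induction l with
  | nil => simp
  | cons x t ih =>
    simp only [List.map_cons, List.sum_cons, ih (hnd.of_cons)]
    by_cases h : c = x
    · subst h
      have : c ∉ t := (List.nodup_cons.mp hnd).1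
      simp [this]
    · simp [h, List.mem_cons]

theorem pv_sum_dedup (l : List Int) (f : Int → Int) :
    (l.map f).sum = ((PySem.List.dedup l).map (fun q => (l.count q : Int) * f q)).sum := by
  rw [Finset.sum_list_map_count, ← List.sum_toFinset _ (PySem.List.nodup_dedup l)]
  have hfin : (PySem.List.dedup l).toFinset = l.toFinset := by
    ext x; simp [List.mem_toFinset]
  rw [hfin]
  refine Finset.sum_congr rfl (fun x _ => ?_)
  simp

-- dict fold lemmas for B
theorem pv_getD_fold_notmem (l : List (Int × Int)) (F : Int × Int → Int) (w0 : PySem.Dict Int Int)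
    (k : Int) (hk : k ∉ l.map Prod.fst) :
    (l.foldl (fun w p => w.insert p.1 (F p)) w0).getD k 0 = w0.getD k 0 := by
  induction l generalizing w0 with
  | nil => rfl
  | cons p t ih =>
    simp only [List.map_cons, List.mem_cons, not_or] at hk
    simp only [List.foldl_cons]
    rw [ih (w0.insert p.1 (F p)) hk.2, PySem.Dict.getD_insert_of_ne _ _ _ hk.1]

theorem pv_getD_fold_mem (l : List (Int × Int)) (F : Int × Int → Int) (w0 : PySem.Dict Int Int)
    (hnd : (l.map Prod.fst).Nodup) (vc : Int × Int) (hvc : vc ∈ l) :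
    (l.foldl (fun w p => w.insert p.1 (F p)) w0).getD vc.1 0 = F vc := by
  induction l generalizing w0 with
  | nil => cases hvc
  | cons p t ih =>
    simp only [List.foldl_cons]
    rcases List.mem_cons.mp hvc with h | h
    · subst h
      have hnd' : (vc.1 :: t.map Prod.fst).Nodup := by simpa using hnd
      have hnot : vc.1 ∉ t.map Prod.fst := (List.nodup_cons.mp hnd').1
      rw [pv_getD_fold_notmem t F _ vc.1 hnot, PySem.Dict.getD_insert_self]
    · have hnd' : (p.1 :: t.map Prod.fst).Nodup := by simpa using hnd
      exact ih (w0.insert p.1 (F p)) hnd'.of_cons h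


theorem pv_sum_mul_left (l : List Int) (a : Int) (f : Int → Int) :
    (l.map (fun x => a * f x)).sum = a * (l.map f).sum := by
  induction l with
  | nil => simp
  | cons x t ih => simp [ih, mul_add]

theorem pv_sum_ind_len (l : List Int) (p : Int → Prop) [DecidablePred p] :
    (l.map (fun i => if p i then (1 : Int) else 0)).sum
      = ((l.filter (fun i => decide (p i))).length : Int) := by
  induction l with
  | nil => simp
  | cons x t ih =>
    by_cases h : p x
    · simp [h, ih]; ring
    · simp [h, ih]

theorem pv_sum_indicator (l1 l2 : List Int) (p1 p2 : Int → Prop) [DecidablePred p1] [DecidablePred p2]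
    (h1 : l1.Nodup) (h2 : l2.Nodup) (hiff : ∀ x, x ∈ l1 ∧ p1 x ↔ x ∈ l2 ∧ p2 x) :
    (l1.map (fun i => if p1 i then (1 : Int) else 0)).sum
      = (l2.map (fun i => if p2 i then (1 : Int) else 0)).sum := by
  rw [pv_sum_ind_len, pv_sum_ind_len]
  have hfin : (l1.filter (fun i => decide (p1 i))).toFinset = (l2.filter (fun i => decide (p2 i))).toFinset := by
    ext x
    simp only [List.mem_toFinset, List.mem_filter, decide_eq_true_eq]
    exact hiff x
  rw [← List.toFinset_card_of_nodup (h1.filter _), ← List.toFinset_card_of_nodup (h2.filter _), hfin]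

-- the per-card value equality, the heart of the proof
theorem pv_value (cards : List Int) (size : Int)
    (hpos : ∀ c ∈ cards, 1 ≤ c)
    (hsz : PySem.List.max? cards (fun x => x) = some size)
    (c : Int) (hc : c ∈ cards) :
    PySem.List.pyGetD
      (pvWinLoop cards (pvVisitLoop cards ((PySem.List.pyRange 0 (size + 1) 1).map (fun _ => true)))
        size ((PySem.List.pyRange 0 (size + 1) 1).map (fun _ => (0 : Int)))) c 0
    = ((PySem.Dict.counter cards).items.foldl
        (fun w vc => w.insert vc.1 (pvInnerB (PySem.Dict.counter cards).items vc))
        PySem.Dict.empty).getD c 0 := by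
  have hub : ∀ y ∈ cards, y ≤ size := PySem.List.max?_isMax hsz
  have hsmem : size ∈ cards := PySem.List.max?_mem hsz
  have hs1 : 1 ≤ size := hpos size hsmem
  have hc1 : 1 ≤ c := hpos c hc
  have hcs : c ≤ size := hub c hc
  set vis0 : List Bool := (PySem.List.pyRange 0 (size + 1) 1).map (fun _ => true) with hvis0
  set wins0 : List Int := (PySem.List.pyRange 0 (size + 1) 1).map (fun _ => (0 : Int)) with hwins0
  have hvlen : (vis0.length : Int) = size + 1 := by
    rw [hvis0]; rw [List.length_map, PySem.List.length_pyRange_one]; omega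
  have hwlen : (wins0.length : Int) = size + 1 := by
    rw [hwins0]; rw [List.length_map, PySem.List.length_pyRange_one]; omega
  set visited := pvVisitLoop cards vis0 with hvisited
  have hpres : ∀ i : Int, 0 ≤ i → i < size + 1 →
      PySem.List.pyGetD visited i true = if i ∈ cards then false else true := by
    intro i h0 hilt
    rw [hvisited, pv_visited cards vis0
        (fun x hx => ⟨by have := hpos x hx; omega, by rw [hvlen]; have := hub x hx; omega⟩)
        i h0 (by rw [hvlen]; omega)]
    by_cases hm : i ∈ cards
    · simp [hm]
    · rw [if_neg hm, if_neg hm, hvis0,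
        PySem.List.pyGetD_map_pyRange_of_nonneg _ _ _ _ h0 hilt]
  have hpresc : PySem.List.pyGetD visited c true = false := by
    rw [hpres c (by omega) (by omega), if_pos hc]
  -- A side: fold to a double sum
  rw [pv_outer_getD cards visited size wins0 (fun x hx => ⟨hpos x hx, hub x hx⟩) hwlen c (by omega)
      (by rw [hwlen]; omega)]
  have h00 : PySem.List.pyGetD wins0 c 0 = 0 := by
    rw [hwins0]; exact PySem.List.pyGetD_map_pyRange_of_nonneg _ _ _ _ (by omega) (by omega)
  rw [h00, zero_add]
  -- B side: reduce the dict fold to the inner sum at c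
  have hkeys : PySem.List.dedup cards = PySem.Set.ofList cards := PySem.List.dedup_eq_ofList cards
  have hitems : (PySem.Dict.counter cards).items
      = (PySem.List.dedup cards).map (fun k => (k, (cards.count k : Int))) := by
    rw [PySem.Dict.items_counter, hkeys]
  have hndk : (PySem.List.dedup cards).Nodup := PySem.List.nodup_dedup cards
  have hndfst : ((PySem.Dict.counter cards).items.map Prod.fst).Nodup := by
    rw [hitems, List.map_map]
    have hco : (Prod.fst ∘ fun k => ((k, (cards.count k : Int)) : Int × Int)) = id := by
      funext k; rfl
    rw [hco, List.map_id]
    exact hndk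
  have hcmem : ((c, (cards.count c : Int)) : Int × Int) ∈ (PySem.Dict.counter cards).items := by
    rw [hitems]
    exact List.mem_map_of_mem ((PySem.List.mem_dedup cards c).mpr hc)
  rw [pv_getD_fold_mem (PySem.Dict.counter cards).items
      (pvInnerB (PySem.Dict.counter cards).items) PySem.Dict.empty hndfst
      ((c, (cards.count c : Int)) : Int × Int) hcmem]
  -- B inner loop as a sum over the distinct values
  have hB2 : pvInnerB (PySem.Dict.counter cards).items ((c, (cards.count c : Int)) : Int × Int)
      = ((PySem.List.dedup cards).map (fun q =>
          if q ≠ c then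
            (if c ∣ q then (cards.count c : Int) else if q ∣ c then -(cards.count q : Int) else 0)
          else 0)).sum := by
    unfold pvInnerB
    rw [PySem.List.foldl_congr_mem _ _
        (fun s (qc : Int × Int) => s +
          (if qc.1 ≠ c then
            (if PySem.Int.mod qc.1 c == 0 then (cards.count c : Int)
             else if PySem.Int.mod c qc.1 == 0 then -qc.2 else 0)
          else 0)) 0
        (by intro acc qc _; dsimp only; split_ifs <;> ring)]
    rw [PySem.List.foldl_add, zero_add, hitems, List.map_map]
    refine congrArg List.sum ?_
    apply List.map_congr_left
    intro q hq
    have hq1 : 1 ≤ q := hpos q ((PySem.List.mem_dedup cards q).mp hq)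
    simp only [Function.comp_apply]
    rw [pv_mod_zero q c (by omega), pv_mod_zero c q (by omega)]
    simp only [decide_eq_true_eq]
  rw [hB2]
  -- split the A-side inner sum
  have hsplitδ : ∀ (card i : Int), pvδ (fun i => PySem.List.pyGetD visited i true) c card i
      = (if PySem.List.pyGetD visited i true then 0 else (if c = card then (1 : Int) else 0))
        + (if PySem.List.pyGetD visited i true then 0 else (if c = i then (-1 : Int) else 0)) := by
    intro card i; unfold pvδ; split_ifs <;> ring
  have hInner : ∀ card ∈ cards,
      ((PySem.List.pyRange (card * 2) (size + 1) card).map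
        (fun i => pvδ (fun i => PySem.List.pyGetD visited i true) c card i)).sum
      = (if c = card then
          ((PySem.List.pyRange (card * 2) (size + 1) card).map
            (fun i => if PySem.List.pyGetD visited i true then 0 else (1 : Int))).sum
         else 0)
        + (if card ∣ c ∧ card ≠ c then (-1 : Int) else 0) := by
    intro card hcd
    have h1 : 1 ≤ card := hpos card hcd
    rw [List.map_congr_left (fun i _ => hsplitδ card i), PySem.List.sum_map_add_int]
    congr 1
    · by_cases hcc : c = card
      · rw [if_pos hcc, if_pos hcc]
      · rw [if_neg hcc, if_neg hcc]
        simp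
    · rw [List.map_congr_left (fun i (_ : i ∈ PySem.List.pyRange (card * 2) (size + 1) card) =>
        show (if PySem.List.pyGetD visited i true then (0:Int) else if c = i then -1 else 0)
           = (if c = i then (if PySem.List.pyGetD visited i true then 0 else -1) else 0) from by
          split_ifs <;> rfl)]
      rw [pv_sum_ite_mem _ (pv_nodup_range size card (by omega)) c _]
      by_cases hmem : c ∈ PySem.List.pyRange (card * 2) (size + 1) card
      · rw [if_pos hmem, hpresc,
          if_pos ((pv_mem_range_iff size card c h1 hc1 hcs).mp hmem)]
        rfl
      · rw [if_neg hmem, if_neg (fun hh => hmem ((pv_mem_range_iff size card c h1 hc1 hcs).mpr hh))]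
  rw [List.map_congr_left hInner, PySem.List.sum_map_add_int, pv_sum_ite_count,
      pv_sum_dedup cards (fun card => if card ∣ c ∧ card ≠ c then (-1 : Int) else 0)]
  -- split the B-side sum
  have hsplitB : ∀ q ∈ PySem.List.dedup cards,
      (if q ≠ c then
        (if c ∣ q then (cards.count c : Int) else if q ∣ c then -(cards.count q : Int) else 0)
       else 0)
      = (if q ≠ c ∧ c ∣ q then (cards.count c : Int) else 0)
        + (cards.count q : Int) * (if q ∣ c ∧ q ≠ c then (-1 : Int) else 0) := by
    intro q hq
    have hq1 : 1 ≤ q := hpos q ((PySem.List.mem_dedup cards q).mp hq)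
    by_cases hne : q = c
    · subst hne; simp
    · rw [if_pos hne]
      by_cases hcq : c ∣ q
      · have hnqc : ¬ q ∣ c := fun hqc => hne (Int.dvd_antisymm (by omega) (by omega) hqc hcq)
        rw [if_pos hcq, if_pos (show q ≠ c ∧ c ∣ q from ⟨hne, hcq⟩),
          if_neg (show ¬(q ∣ c ∧ q ≠ c) from fun hh => hnqc hh.1)]
        ring
      · rw [if_neg hcq, if_neg (show ¬(q ≠ c ∧ c ∣ q) from fun hh => hcq hh.2)]
        by_cases hqc : q ∣ c
        · rw [if_pos hqc, if_pos (show q ∣ c ∧ q ≠ c from ⟨hqc, hne⟩)]; ring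
        · rw [if_neg hqc, if_neg (show ¬(q ∣ c ∧ q ≠ c) from fun hh => hqc hh.1)]; ring
  rw [List.map_congr_left hsplitB, PySem.List.sum_map_add_int]
  congr 1
  · -- count c * Nf = Σ indicator * count c
    have hfactor : ∀ q : Int, (if q ≠ c ∧ c ∣ q then (cards.count c : Int) else 0)
        = (cards.count c : Int) * (if q ≠ c ∧ c ∣ q then (1 : Int) else 0) := by
      intro q; split_ifs <;> ring
    rw [List.map_congr_left (fun q _ => hfactor q), pv_sum_mul_left]
    congr 1
    -- Nf c = Σ_{q∈dedup} [q ≠ c ∧ c ∣ q]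
    have hNf : ((PySem.List.pyRange (c * 2) (size + 1) c).map
        (fun i => if PySem.List.pyGetD visited i true then 0 else (1 : Int))).sum
        = ((PySem.List.pyRange (c * 2) (size + 1) c).map
        (fun i => if i ∈ cards then (1 : Int) else 0)).sum := by
      refine congrArg List.sum (List.map_congr_left (fun i hi => ?_))
      have hb := (PySem.List.mem_pyRange_iff_of_pos (by omega : (0:Int) < c) i).mp hi
      rw [hpres i (by omega) (by omega)]
      by_cases hm : i ∈ cards
      · rw [if_pos hm, if_pos hm]; rfl
      · rw [if_neg hm, if_neg hm]; rfl
    rw [hNf]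
    exact pv_sum_indicator _ _ (fun i => i ∈ cards) (fun q => q ≠ c ∧ c ∣ q)
      (pv_nodup_range size c (by omega)) hndk
      (fun x => by
        constructor
        · rintro ⟨hx, hm⟩
          have hx1 : 1 ≤ x := hpos x hm
          have hxs : x ≤ size := hub x hm
          obtain ⟨hdvd, hne⟩ := (pv_mem_range_iff size c x (by omega) hx1 hxs).mp hx
          exact ⟨(PySem.List.mem_dedup cards x).mpr hm, fun hh => hne hh.symm, hdvd⟩
        · rintro ⟨hx, hne, hdvd⟩
          have hm := (PySem.List.mem_dedup cards x).mp hx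
          have hx1 : 1 ≤ x := hpos x hm
          have hxs : x ≤ size := hub x hm
          exact ⟨(pv_mem_range_iff size c x (by omega) hx1 hxs).mpr ⟨hdvd, fun hh => hne hh.symm⟩, hm⟩)

-- ===== VERDICT (by name: the statement is the Claim_ definition above) =====
theorem solution_spec : Claim_equal_solution := by
  intro params _hdom hpre
  obtain ⟨hne, hpos⟩ := hpre
  obtain ⟨n, cards⟩ := params
  simp only [Spec_solution, solution, solution_alt] at *
  rw [PySem.Dict.foldl_insert_getD_add_one_eq_counter]
  cases hmax : PySem.List.max? cards (fun x => x) with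
  | none => exact absurd ((PySem.List.max?_eq_none_iff _ _).mp hmax) hne
  | some size =>
    dsimp only
    rw [PySem.List.foldl_append_singleton_eq_map, List.nil_append]
    exact List.map_congr_left (fun c hc => pv_value cards size hpos hmax c hc)
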